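-- pv_equiv track=rewrite | github.com/CChristidis/Apriori-SON-Python | src/Apriori.py | ExactCounting
-- ===== SOURCE A (Python) =====
-- from itertools import combinations, islice, chain
--
-- def ExactCounting(itemBaskets):
--     hashTable = {}  # init of hash-table structure for subset counting
--
--     for i in itemBaskets:  # for every itme in basket...
--         for j in range(len(itemBaskets[i])) :  # for every set in basket...
--             for k in combinations(sorted(itemBaskets[i]), j+1):  # find every possible combination for this set
--                 if k not in hashTable:
--                     hashTable[k] = 1
--                 else:
--                     hashTable[k] += 1
--     return hashTable
-- ===== SOURCE B (Python) =====
-- def ExactCounting(itemBaskets):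
--     counts = {}
--     for i in itemBaskets:
--         items = sorted(itemBaskets[i])
--         # level-wise (Apriori-style) subset generation: each level extends the
--         # previous level's subsets with one later element of the remaining suffix
--         level = [((), tuple(items))]
--         for _ in range(len(items)):
--             nxt = []
--             for prefix, rest in level:
--                 for p in range(len(rest)):
--                     nxt.append((prefix + (rest[p],), rest[p + 1:]))
--             for key, _rest in nxt:
--                 counts[key] = counts.get(key, 0) + 1
--             level = nxt
--     return counts
-- ===== Notes on version B (the rewrite author's own statement) =====
-- stated objective: alternative
-- what changed: Replaces the size loop with itertools.combinations by an Apriori-style level-wise dynamic generation: each level's (prefix, remaining-suffix) pairs are extended by one later element, so no combinations call and each subset is built incrementally from the previous level.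
import Mathlib
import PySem

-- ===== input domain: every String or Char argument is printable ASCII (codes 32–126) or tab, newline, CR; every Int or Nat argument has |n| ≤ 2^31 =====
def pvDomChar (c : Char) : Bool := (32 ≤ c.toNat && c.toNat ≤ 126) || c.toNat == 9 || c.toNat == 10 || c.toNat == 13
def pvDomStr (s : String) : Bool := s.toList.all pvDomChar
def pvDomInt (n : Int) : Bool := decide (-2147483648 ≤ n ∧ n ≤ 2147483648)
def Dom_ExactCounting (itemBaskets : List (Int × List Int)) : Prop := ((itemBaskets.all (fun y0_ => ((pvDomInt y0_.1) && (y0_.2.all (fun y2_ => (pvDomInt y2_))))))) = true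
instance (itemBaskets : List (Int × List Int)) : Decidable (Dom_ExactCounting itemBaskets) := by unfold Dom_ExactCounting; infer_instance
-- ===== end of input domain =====

-- B replaces the size-indexed itertools.combinations enumeration by an Apriori-style
-- level-wise extension of (prefix, remaining-suffix) pairs; same cost, different traversal.

-- ===== PORT A =====
-- literal port of A: for i in dict, for j in range(len(basket)), for k in combinations(sorted(basket), j+1): count
def ExactCounting (itemBaskets : List (Int × List Int)) : List (List Int × Int) :=
  let baskets := PySem.Dict.ofList itemBaskets
  let hashTable : PySem.Dict (List Int) Int :=
    (PySem.Dict.keys baskets).foldl (fun ht i =>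
      let basket := (PySem.Dict.get? baskets i).getD []
      (List.range basket.length).foldl (fun ht j =>
        (PySem.List.combinations (PySem.List.sorted basket (fun x => x) false) (j + 1)).foldl
          (fun ht k =>
            if PySem.Dict.contains ht k then ht.insert k (ht.getD k 0 + 1)
            else ht.insert k 1) ht) ht) PySem.Dict.empty
  hashTable.items

-- ===== PORT B =====
-- one extension step: for p in range(len(rest)): append (prefix + (rest[p],), rest[p+1:])
def pvExtend (pre : List Int) (rest : List Int) : List (List Int × List Int) :=
  match rest with
  | [] => []
  | y :: ys => (pre ++ [y], ys) :: pvExtend pre ys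

-- literal port of Source B: level-wise generation, counting each new level's keys
def ExactCounting_alt (itemBaskets : List (Int × List Int)) : List (List Int × Int) :=
  let baskets := PySem.Dict.ofList itemBaskets
  let counts : PySem.Dict (List Int) Int :=
    (PySem.Dict.keys baskets).foldl (fun counts i =>
      let items := PySem.List.sorted ((PySem.Dict.get? baskets i).getD []) (fun x => x) false
      let st := (List.range items.length).foldl
        (fun (st : PySem.Dict (List Int) Int × List (List Int × List Int)) _ =>
          let nxt := st.2.flatMap (fun pr => pvExtend pr.1 pr.2)
          let counts := nxt.foldl (fun d p => d.insert p.1 (d.getD p.1 0 + 1)) st.1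
          (counts, nxt)) (counts, [([], items)])
      st.1) PySem.Dict.empty
  counts.items

-- ===== PRECONDITION & SPEC =====
def Spec_ExactCounting (itemBaskets : List (Int × List Int)) (out : List (List Int × Int)) : Prop := out = ExactCounting_alt itemBaskets
instance (itemBaskets : List (Int × List Int)) (out : List (List Int × Int)) : Decidable (Spec_ExactCounting itemBaskets out) := by unfold Spec_ExactCounting; infer_instance

-- ===== CLAIM (what is proved, stated in full; the proofs are below) =====
def Claim_equal_ExactCounting : Prop := ∀ (itemBaskets : List (Int × List Int)), Dom_ExactCounting itemBaskets → Spec_ExactCounting itemBaskets (ExactCounting itemBaskets)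

-- ===== LEMMAS AND PROOFS =====

-- combinations-with-remaining-suffix, carrying the prefix built so far
def pvDs (k : Nat) (s : List Int) (l : List Int) : List (List Int × List Int) :=
  match k, l with
  | 0, l => [(s, l)]
  | _ + 1, [] => []
  | k + 1, x :: xs => pvDs k (s ++ [x]) xs ++ pvDs (k + 1) s xs

theorem pvExtend_eq_Ds (s l : List Int) : pvExtend s l = pvDs 1 s l := by
  induction l generalizing s with
  | nil => rfl
  | cons x xs ih => simp [pvExtend, pvDs, ih]

theorem pvStep_Ds (l : List Int) : ∀ (k : Nat) (s : List Int),
    (pvDs k s l).flatMap (fun pr => pvExtend pr.1 pr.2) = pvDs (k + 1) s l := by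
  induction l with
  | nil =>
    intro k s
    cases k with
    | zero => simp [pvDs, pvExtend]
    | succ k => simp [pvDs]
  | cons x xs ih =>
    intro k s
    cases k with
    | zero => simp [pvDs, pvExtend_eq_Ds]
    | succ k => simp [pvDs, List.flatMap_append, ih]

theorem pvDs_fst (l : List Int) : ∀ (k : Nat) (s : List Int),
    (pvDs k s l).map Prod.fst = (PySem.List.combinations l k).map (s ++ ·) := by
  induction l with
  | nil =>
    intro k s
    cases k with
    | zero => simp [pvDs, PySem.List.combinations_zero]
    | succ k => simp [pvDs, PySem.List.combinations_nil_succ]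
  | cons x xs ih =>
    intro k s
    cases k with
    | zero => simp [pvDs, PySem.List.combinations_zero]
    | succ k =>
      simp only [pvDs, List.map_append, ih, PySem.List.combinations_cons_succ, List.map_map]
      congr 1
      apply List.map_congr_left; intro c _; simp

-- the counting update of A equals the one of B, on any dict and key
theorem pvUpd_eq (d : PySem.Dict (List Int) Int) (k : List Int) :
    (if PySem.Dict.contains d k then d.insert k (d.getD k 0 + 1) else d.insert k 1)
      = d.insert k (d.getD k 0 + 1) := by
  by_cases h : PySem.Dict.contains d k
  · simp [h]
  · have hc : PySem.Dict.contains d k = false := by simpa using h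
    rw [if_neg (by simp [hc])]
    rw [PySem.Dict.getD_of_not_contains _ _ hc]
    norm_num

-- pointwise-equal step functions fold alike
theorem pvFoldl_congr {A B : Type} (l : List B) (f g : A → B → A) (a : A)
    (h : ∀ x b, f x b = g x b) : l.foldl f a = l.foldl g a := by
  induction l generalizing a with
  | nil => rfl
  | cons x xs ih => rw [List.foldl_cons, List.foldl_cons, h, ih]

-- counting a list of pairs by first component = counting the fst-projection
theorem pvCount_pairs (l : List (List Int × List Int)) (d : PySem.Dict (List Int) Int) :
    l.foldl (fun d p => d.insert p.1 (d.getD p.1 0 + 1)) d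
      = (l.map Prod.fst).foldl (fun d k => d.insert k (d.getD k 0 + 1)) d := by
  rw [List.foldl_map]

-- B's level loop invariant: after t rounds the level is pvDs t [] items and the dict is
-- A's dict after counting combinations of sizes 1..t
theorem pvLevel_inv (items : List Int) (d : PySem.Dict (List Int) Int) (t : Nat) :
    (List.range t).foldl
        (fun (st : PySem.Dict (List Int) Int × List (List Int × List Int)) _ =>
          let nxt := st.2.flatMap (fun pr => pvExtend pr.1 pr.2)
          let counts := nxt.foldl (fun d p => d.insert p.1 (d.getD p.1 0 + 1)) st.1
          (counts, nxt)) (d, [([], items)])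
      = ((List.range t).foldl (fun d j =>
            (PySem.List.combinations items (j + 1)).foldl
              (fun d k => d.insert k (d.getD k 0 + 1)) d) d,
         pvDs t [] items) := by
  induction t with
  | zero => simp [pvDs]
  | succ t ih =>
    rw [List.range_succ, List.foldl_append, List.foldl_append, ih]
    simp only [List.foldl_cons, List.foldl_nil]
    rw [pvStep_Ds, pvCount_pairs, pvDs_fst]
    simp

-- ===== VERDICT (by name: the statement is the Claim_ definition above) =====
theorem ExactCounting_spec : Claim_equal_ExactCounting := by
  intro itemBaskets _
  unfold Spec_ExactCounting ExactCounting ExactCounting_alt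
  simp only []
  congr 1
  apply pvFoldl_congr
  intro ht i
  rw [pvLevel_inv]
  simp only []
  have hlen : (PySem.List.sorted ((PySem.Dict.get? (PySem.Dict.ofList itemBaskets) i).getD []) (fun x => x) false).length
      = ((PySem.Dict.get? (PySem.Dict.ofList itemBaskets) i).getD []).length :=
    PySem.List.length_sorted _ _ _
  rw [hlen]
  apply pvFoldl_congr
  intro d j
  apply pvFoldl_congr
  intro d k
  exact pvUpd_eq d k
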